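-- pv_equiv track=rewrite | github.com/thuannguyen912/splunk_confi_repos | apps/python_upgrade_readiness_app/bin/pura_export_report.py | write_columns
-- ===== SOURCE A (Python) =====
-- from builtins import range
--
-- def write_columns(name, status, source, row_list):
--     """
--     Write individual columns as per check value list
--
--     :param row_list: List of lists containing file entries for individual check
--     :param name: Name of the app
--     :param status: Status of the app
--     :param source: Source/type of the app
--
--     :return app_rows: List of list containing row values for given app
--     """
--
--     app_rows = list()
--
--     xml_list = row_list[0]
--     cherry_list = row_list[1]
--     cherry_syntax_list = row_list[2]
--     mako_list = row_list[3]
--     mako_syntax_list = row_list[4]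
--     libraries_list = row_list[5]
--     test_list = row_list[6]
--     weblegacy_list = row_list[7]
--     pyfiles_list = row_list[8]
--     pyfiles_syntax_list = row_list[9]
--
--     max_rows = max(len(xml_list), len(cherry_list), len(cherry_syntax_list), len(mako_list), len(mako_syntax_list),
--                    len(libraries_list), len(test_list), len(weblegacy_list), len(pyfiles_list),
--                    len(pyfiles_syntax_list))
--
--     if max_rows == 0:
--         app_rows.append([name, status, source, "~", "~", "~", "~", "~", "~", "~", "~", "~", "~"])
--         return app_rows
--
--     for index in range(0, max_rows):
--         row = [name, status, source]
--         for position, value in enumerate(row_list):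
--             try:
--                 row.append(value[index])
--             except IndexError:
--                 row.append("~")
--
--         app_rows.append(row)
--
--     return app_rows
-- ===== SOURCE B (Python) =====
-- def write_columns(name, status, source, row_list):
--     max_rows = max(len(row_list[i]) for i in range(10))
--     if max_rows == 0:
--         return [[name, status, source] + ["~"] * 10]
--     padded = [(col + ["~"] * max_rows)[:max_rows] for col in row_list]
--     return [[name, status, source] + list(cells) for cells in zip(*padded)]
-- ===== Notes on version B (the rewrite author's own statement) =====
-- stated objective: idiomatic
-- what changed: Replaces the index loop with per-cell try/except by padding every column to a rectangle and transposing it with zip(*padded), building each row from one transposed tuple.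
import Mathlib
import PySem

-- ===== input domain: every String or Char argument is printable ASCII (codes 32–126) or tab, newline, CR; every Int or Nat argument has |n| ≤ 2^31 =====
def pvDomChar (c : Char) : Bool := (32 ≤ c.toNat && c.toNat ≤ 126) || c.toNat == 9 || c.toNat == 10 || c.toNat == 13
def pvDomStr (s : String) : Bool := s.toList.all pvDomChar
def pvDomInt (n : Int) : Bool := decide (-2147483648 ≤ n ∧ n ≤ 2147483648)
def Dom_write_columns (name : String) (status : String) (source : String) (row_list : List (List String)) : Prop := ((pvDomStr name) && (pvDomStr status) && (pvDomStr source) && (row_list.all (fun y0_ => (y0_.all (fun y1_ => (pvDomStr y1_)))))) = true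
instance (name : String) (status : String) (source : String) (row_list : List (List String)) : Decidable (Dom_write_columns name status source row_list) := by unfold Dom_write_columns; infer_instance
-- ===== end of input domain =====

-- B is the same task written by transposition: pad every column to a rectangle, zip(*padded); return value only, neither mutates.

-- ===== PORT A =====
-- A indexes row_list[0]..row_list[9]; Pre_ guarantees those exist, so getD's default is never used.
def write_columns (name : String) (status : String) (source : String) (row_list : List (List String)) : List (List String) :=
  let xml_list := row_list.getD 0 []
  let cherry_list := row_list.getD 1 []
  let cherry_syntax_list := row_list.getD 2 []
  let mako_list := row_list.getD 3 []
  let mako_syntax_list := row_list.getD 4 []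
  let libraries_list := row_list.getD 5 []
  let test_list := row_list.getD 6 []
  let weblegacy_list := row_list.getD 7 []
  let pyfiles_list := row_list.getD 8 []
  let pyfiles_syntax_list := row_list.getD 9 []
  -- Python max(a0,…,a9) folds left
  let max_rows :=
    max (max (max (max (max (max (max (max (max xml_list.length cherry_list.length)
      cherry_syntax_list.length) mako_list.length) mako_syntax_list.length)
      libraries_list.length) test_list.length) weblegacy_list.length)
      pyfiles_list.length) pyfiles_syntax_list.length
  if max_rows = 0 then
    [[name, status, source, "~", "~", "~", "~", "~", "~", "~", "~", "~", "~"]]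
  else
    (List.range max_rows).map (fun (index : Nat) =>
      -- try: row.append(value[index]) except IndexError: row.append("~")
      [name, status, source] ++ row_list.map (fun value => (PySem.List.pyGet? value (index : Int)).getD "~"))

-- ===== PORT B =====
-- zip(*padded): stop at the first exhausted list (here all lists have equal length)
def pvZipStar (ls : List (List String)) : List (List String) :=
  if ls.isEmpty || ls.any (·.isEmpty) then []
  else (ls.map (fun col => col.headD "")) :: pvZipStar (ls.map (·.tail))
termination_by (ls.headD []).length
decreasing_by
  rename_i h
  cases ls with
  | nil => simp at h
  | cons c rest =>
    simp only [List.isEmpty_cons, Bool.false_or, List.any_cons, Bool.or_eq_true] at h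
    push Not at h
    cases c with
    | nil => simp at h
    | cons x xs => simp

def write_columns_alt (name : String) (status : String) (source : String) (row_list : List (List String)) : List (List String) :=
  let max_rows := (((List.range 10).map (fun i => (row_list.getD i []).length)).max?).getD 0   -- max(len(row_list[i]) for i in range(10)); Pre_ keeps the indices in range
  if max_rows = 0 then
    [[name, status, source] ++ List.replicate 10 "~"]
  else
    let padded := row_list.map (fun col => (col ++ List.replicate max_rows "~").take max_rows)
    (pvZipStar padded).map (fun cells => [name, status, source] ++ cells)

-- ===== PRECONDITION & SPEC =====
-- Pre_ excludes row_list with fewer than 10 columns: there the Python A raises (IndexError on row_list[9], or ValueError via max on []).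
def Pre_write_columns (name : String) (status : String) (source : String) (row_list : List (List String)) : Prop :=
  10 ≤ row_list.length
instance (name : String) (status : String) (source : String) (row_list : List (List String)) : Decidable (Pre_write_columns name status source row_list) := by unfold Pre_write_columns; infer_instance

def pvWitness_write_columns : String × String × String × List (List String) :=
  ("app", "ok", "src", [["a"], [], ["b", "c"], [], [], [], [], [], [], ["d"]])

def Spec_write_columns (name : String) (status : String) (source : String) (row_list : List (List String)) (out : List (List String)) : Prop := out = write_columns_alt name status source row_list
instance (name : String) (status : String) (source : String) (row_list : List (List String)) (out : List (List String)) : Decidable (Spec_write_columns name status source row_list out) := by unfold Spec_write_columns; infer_instance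

-- ===== CLAIM (what is proved, stated in full; the proofs are below) =====
def Claim_equal_write_columns : Prop := ∀ (name : String) (status : String) (source : String) (row_list : List (List String)), Dom_write_columns name status source row_list → Pre_write_columns name status source row_list → Spec_write_columns name status source row_list (write_columns name status source row_list)

-- ===== LEMMAS AND PROOFS =====

-- zip of a rectangular, nonempty list of columns is the row-indexed transpose
theorem pvZipStar_rect (n : Nat) : ∀ (ls : List (List String)), ls ≠ [] →
    (∀ col ∈ ls, col.length = n) →
    pvZipStar ls = (List.range n).map (fun i => ls.map (fun col => col.getD i "")) := by
  induction n with
  | zero =>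
    intro ls hne hlen
    rw [pvZipStar]
    have hz : (ls.any (·.isEmpty)) = true := by
      cases ls with
      | nil => exact absurd rfl hne
      | cons c rest =>
        have hc := hlen c (by simp)
        simp [List.length_eq_zero_iff.mp hc]
    simp [hz]
  | succ n ih =>
    intro ls hne hlen
    rw [pvZipStar]
    have hnoemp : (ls.any (·.isEmpty)) = false := by
      rw [List.any_eq_false]
      intro col hc
      have hl := hlen col hc
      simp only [List.isEmpty_iff]
      intro h; rw [h] at hl; simp at hl
    have hnotnil : ls.isEmpty = false := by simp [hne]
    have htails : ∀ col ∈ ls.map (·.tail), col.length = n := by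
      intro col hc
      simp only [List.mem_map] at hc
      obtain ⟨c, hc1, hc2⟩ := hc
      have := hlen c hc1
      subst hc2
      simp [List.length_tail, this]
    have htne : ls.map (·.tail) ≠ [] := by simpa using hne
    rw [ih _ htne htails, List.range_succ_eq_map]
    simp only [hnoemp, hnotnil, Bool.or_self, Bool.false_eq_true, if_false,
      List.map_cons, List.map_map]
    congr 1
    · apply List.map_congr_left
      intro col hc
      have := hlen col hc
      cases col with
      | nil => simp at this
      | cons x xs => simp
    · apply List.map_congr_left
      intro i _
      simp only [Function.comp_apply, List.map_map]
      apply List.map_congr_left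
      intro col _
      cases col <;> simp

-- a padded column read at i < m is Python's value[i]-or-"~"
theorem pad_getD (col : List String) (m i : Nat) (hi : i < m) :
    ((col ++ List.replicate m "~").take m).getD i "" = (PySem.List.pyGet? col (i : Int)).getD "~" := by
  rw [PySem.List.pyGet?_natCast]
  simp only [List.getD, List.getElem?_take, hi, if_pos]
  by_cases h : i < col.length
  · rw [List.getElem?_append_left h]
    simp [List.getElem?_eq_getElem h]
  · rw [List.getElem?_append_right (by omega), List.getElem?_replicate,
      List.getElem?_eq_none (by omega : col.length ≤ i)]
    have hlt : i - col.length < m := by omega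
    simp [hlt]

theorem pad_length (col : List String) (m : Nat) :
    ((col ++ List.replicate m "~").take m).length = m := by
  simp

-- ===== VERDICT (by name: the statement is the Claim_ definition above) =====
set_option maxHeartbeats 800000 in
theorem write_columns_spec : Claim_equal_write_columns := by
  intro name status source row_list _ hpre
  unfold Spec_write_columns
  unfold Pre_write_columns at hpre
  rcases row_list with _|⟨l0,_|⟨l1,_|⟨l2,_|⟨l3,_|⟨l4,_|⟨l5,_|⟨l6,_|⟨l7,_|⟨l8,_|⟨l9,rest⟩⟩⟩⟩⟩⟩⟩⟩⟩⟩ <;>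
    simp only [List.length_nil, List.length_cons] at hpre <;> try omega
  clear hpre
  have hBmax : ((((List.range 10).map (fun i => ((l0::l1::l2::l3::l4::l5::l6::l7::l8::l9::rest : List (List String)).getD i []).length)).max?).getD 0) =
      max (max (max (max (max (max (max (max (max l0.length l1.length) l2.length) l3.length)
        l4.length) l5.length) l6.length) l7.length) l8.length) l9.length := rfl
  unfold write_columns write_columns_alt
  rw [hBmax]
  simp only [List.getD, List.getElem?_cons_zero, List.getElem?_cons_succ, Option.getD_some]
  generalize hM : max (max (max (max (max (max (max (max (max l0.length l1.length) l2.length) l3.length)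
        l4.length) l5.length) l6.length) l7.length) l8.length) l9.length = M
  by_cases h0 : M = 0
  · rw [if_pos h0, if_pos h0]
    rfl
  · rw [if_neg h0, if_neg h0]
    have hrect : ∀ col ∈ (l0::l1::l2::l3::l4::l5::l6::l7::l8::l9::rest : List (List String)).map
        (fun col => (col ++ List.replicate M "~").take M), col.length = M := by
      intro col hc
      simp only [List.mem_map] at hc
      obtain ⟨c, _, hc2⟩ := hc
      subst hc2; exact pad_length c M
    have hne : (l0::l1::l2::l3::l4::l5::l6::l7::l8::l9::rest : List (List String)).map
        (fun col => (col ++ List.replicate M "~").take M) ≠ [] := by simp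
    rw [pvZipStar_rect M _ hne hrect, List.map_map]
    apply List.map_congr_left
    intro i hi
    simp only [Function.comp_apply, List.map_map]
    refine congrArg (fun t => [name, status, source] ++ t) ?_
    apply List.map_congr_left
    intro col _
    exact (pad_getD col M i (List.mem_range.mp hi)).symm
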